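-- pv_equiv track=rewrite | github.com/sylvanus4/github-to-notion-sync | .cursor/skills/marketing/marketing-sales-pipeline/scripts/rb2b_instantly_router.py | score_intent
-- ===== SOURCE A (Python) =====
-- PAGE_INTENT_SCORES = {
--     "pricing": 90, "plans": 90, "contact": 85, "demo": 85,
--     "get-started": 85, "free-consultation": 85, "request-demo": 85,
--     "case-study": 70, "case-studies": 70, "results": 70,
--     "services": 65, "solutions": 65, "about": 60,
--     "blog": 30, "podcast": 25,
-- }
--
-- def score_intent(pages):
--     """Score visitor intent from pages visited. Returns 0-100."""
--     if not pages:
--         return 30  # default low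
--     if isinstance(pages, str):
--         pages = [pages]
--     max_score = 20
--     for page in pages:
--         path = page.lower().strip("/")
--         for pattern, score in PAGE_INTENT_SCORES.items():
--             if pattern in path:
--                 max_score = max(max_score, score)
--     return max_score
-- ===== SOURCE B (Python) =====
-- # Score tiers, highest first: one entry per score, the patterns that earn it.
-- INTENT_TIERS = [
--     (90, ("pricing", "plans")),
--     (85, ("contact", "demo", "get-started", "free-consultation", "request-demo")),
--     (70, ("case-study", "case-studies", "results")),
--     (65, ("services", "solutions")),
--     (60, ("about",)),
--     (30, ("blog",)),
--     (25, ("podcast",)),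
-- ]
--
-- def score_intent(pages):
--     """Score visitor intent from pages visited. Returns 0-100."""
--     if not pages:
--         return 30  # default low
--     if isinstance(pages, str):
--         pages = [pages]
--     paths = [page.lower().strip("/") for page in pages]
--     for score, patterns in INTENT_TIERS:
--         if any(pat in path for pat in patterns for path in paths):
--             return score
--     return 20
-- ===== Notes on version B (the rewrite author's own statement) =====
-- stated objective: alternative
-- what changed: B normalizes pages once and replaces A's page-outer/pattern-inner running-max loop with a table of score tiers grouped and ordered by score descending, returning the first tier any of whose patterns occurs in any normalized page (early exit), 20 if none.
import Mathlib
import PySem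

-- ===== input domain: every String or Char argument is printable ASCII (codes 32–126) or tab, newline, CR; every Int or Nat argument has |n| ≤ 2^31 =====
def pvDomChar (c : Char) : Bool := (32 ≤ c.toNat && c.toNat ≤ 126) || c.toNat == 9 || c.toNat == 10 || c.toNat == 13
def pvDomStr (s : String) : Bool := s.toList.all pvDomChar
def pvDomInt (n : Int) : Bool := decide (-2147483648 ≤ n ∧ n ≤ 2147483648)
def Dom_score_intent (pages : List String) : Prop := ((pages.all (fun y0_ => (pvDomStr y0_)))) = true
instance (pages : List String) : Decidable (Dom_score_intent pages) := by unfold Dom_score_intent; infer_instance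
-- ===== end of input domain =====

-- B replaces A's page-outer/pattern-inner running-max loop by score tiers ordered
-- descending with an early return at the first matched tier; same result, no speed claim.

-- ===== PORT A =====
-- PAGE_INTENT_SCORES.items() in insertion order
def pvScoresA : List (String × Int) :=
  [("pricing", 90), ("plans", 90), ("contact", 85), ("demo", 85),
   ("get-started", 85), ("free-consultation", 85), ("request-demo", 85),
   ("case-study", 70), ("case-studies", 70), ("results", 70),
   ("services", 65), ("solutions", 65), ("about", 60),
   ("blog", 30), ("podcast", 25)]

def score_intent (pages : List String) : Int :=
  if pages = [] then 30
  else
    pages.foldl (fun max_score page =>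
      let path := PySem.Str.stripChars (PySem.Str.lower page) "/"
      pvScoresA.foldl (fun max_score ps =>
        if PySem.Str.isIn ps.1 path then max max_score ps.2 else max_score) max_score) 20

-- ===== PORT B =====
-- INTENT_TIERS: one entry per score, highest first
def pvTiers : List (Int × List String) :=
  [(90, ["pricing", "plans"]),
   (85, ["contact", "demo", "get-started", "free-consultation", "request-demo"]),
   (70, ["case-study", "case-studies", "results"]),
   (65, ["services", "solutions"]),
   (60, ["about"]),
   (30, ["blog"]),
   (25, ["podcast"])]

-- the 'for score, patterns in …: if any(…): return score / else 20' loop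
def pvTierMatch (tiers : List (Int × List String)) (paths : List String) : Int :=
  match tiers with
  | [] => 20
  | (score, patterns) :: rest =>
    if patterns.any (fun pat => paths.any (fun path => PySem.Str.isIn pat path)) then score
    else pvTierMatch rest paths

def score_intent_alt (pages : List String) : Int :=
  if pages = [] then 30
  else
    pvTierMatch pvTiers
      (pages.map (fun page => PySem.Str.stripChars (PySem.Str.lower page) "/"))

-- ===== PRECONDITION & SPEC =====
def Spec_score_intent (pages : List String) (out : Int) : Prop := out = score_intent_alt pages
instance (pages : List String) (out : Int) : Decidable (Spec_score_intent pages out) := by unfold Spec_score_intent; infer_instance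

-- ===== CLAIM (what is proved, stated in full; the proofs are below) =====
def Claim_equal_score_intent : Prop := ∀ (pages : List String), Dom_score_intent pages → Spec_score_intent pages (score_intent pages)

-- ===== LEMMAS AND PROOFS =====

-- proof-side view of B's tier loop as a flat (pattern, score) first-match scan
def pvFlat (tiers : List (Int × List String)) : List (String × Int) :=
  tiers.flatMap (fun t => t.2.map (fun p => (p, t.1)))

def pvFirstMatchH (ps : List (String × Int)) (paths : List String) : Int :=
  match ps with
  | [] => 20
  | (pattern, score) :: rest =>
    if paths.any (fun path => PySem.Str.isIn pattern path) then score
    else pvFirstMatchH rest paths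

theorem pvFirstMatchH_tier (pats : List String) (score : Int)
    (rest : List (String × Int)) (paths : List String) :
    pvFirstMatchH (pats.map (fun p => (p, score)) ++ rest) paths
      = if pats.any (fun pat => paths.any (fun path => PySem.Str.isIn pat path)) then score
        else pvFirstMatchH rest paths := by
  induction pats with
  | nil => simp
  | cons p t ih =>
    simp only [List.map_cons, List.cons_append, pvFirstMatchH, List.any_cons, ih]
    by_cases h : (paths.any fun path => PySem.Str.isIn p path) = true
    · rw [if_pos h, if_pos (by rw [h, Bool.true_or])]
    · simp only [Bool.not_eq_true] at h
      simp only [h, Bool.false_or]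
      rw [if_neg (by simp)]

theorem pvTier_eq_first (tiers : List (Int × List String)) (paths : List String) :
    pvTierMatch tiers paths = pvFirstMatchH (pvFlat tiers) paths := by
  induction tiers with
  | nil => rfl
  | cons t rest ih =>
    obtain ⟨score, pats⟩ := t
    simp only [pvTierMatch, pvFlat, List.flatMap_cons]
    rw [show (rest.flatMap (fun t => t.2.map (fun p => (p, t.1)))) = pvFlat rest from rfl,
      pvFirstMatchH_tier, ih]

-- scores of patterns in ps matching a single path
def pvScores (ps : List (String × Int)) (path : String) : List Int :=
  (ps.filter (fun x => PySem.Str.isIn x.1 path)).map (·.2)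

-- A's inner loop over one path is a running max over the matched scores
theorem pvInner_eq (ps : List (String × Int)) (path : String) (m : Int) :
    ps.foldl (fun m x => if PySem.Str.isIn x.1 path then max m x.2 else m) m
      = (pvScores ps path).foldl max m := by
  induction ps generalizing m with
  | nil => simp [pvScores]
  | cons x t ih =>
    have hs : pvScores (x :: t) path
        = if PySem.Str.isIn x.1 path = true then x.2 :: pvScores t path else pvScores t path := by
      simp only [pvScores, List.filter_cons]
      split <;> rfl
    rw [List.foldl_cons, hs]
    by_cases h : PySem.Str.isIn x.1 path = true
    · rw [if_pos h, if_pos h, List.foldl_cons, ih]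
    · rw [if_neg h, if_neg h, ih]

-- A's outer loop is a running max over all matched scores of all paths
theorem pvOuter_eq (paths : List String) (m : Int) :
    paths.foldl (fun m path =>
        pvScoresA.foldl (fun m x => if PySem.Str.isIn x.1 path then max m x.2 else m) m) m
      = (paths.flatMap (pvScores pvScoresA)).foldl max m := by
  induction paths generalizing m with
  | nil => rfl
  | cons p t ih =>
    rw [List.foldl_cons, List.flatMap_cons, List.foldl_append, pvInner_eq, ih]

-- folding max depends only on the set of elements
theorem pvFoldlMax_subset (m : Int) (l₁ l₂ : List Int)
    (h₁ : ∀ x ∈ l₁, x ∈ l₂) (h₂ : ∀ x ∈ l₂, x ∈ l₁) :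
    l₁.foldl max m = l₂.foldl max m := by
  have key : ∀ (a b : List Int), (∀ x ∈ a, x ∈ b) → a.foldl max m ≤ b.foldl max m := by
    intro a b hab
    rcases PySem.List.foldl_max_mem a m with h | h
    · rw [h]; exact (PySem.List.le_foldl_max b m).1
    · exact (PySem.List.le_foldl_max b m).2 _ (hab _ h)
  exact le_antisymm (key _ _ h₁) (key _ _ h₂)

-- the matched scores, grouped by path or by pattern, are the same set
theorem pvMem_flatMap_iff (paths : List String) (x : Int) :
    x ∈ paths.flatMap (pvScores pvScoresA) ↔
      x ∈ (pvScoresA.filter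
            (fun p => paths.any (fun path => PySem.Str.isIn p.1 path))).map (·.2) := by
  simp only [List.mem_flatMap, pvScores, List.mem_map, List.mem_filter,
    List.any_eq_true]
  constructor
  · rintro ⟨path, hp, y, ⟨hy, hin⟩, rfl⟩
    exact ⟨y, ⟨hy, path, hp, hin⟩, rfl⟩
  · rintro ⟨y, ⟨hy, path, hp, hin⟩, rfl⟩
    exact ⟨path, hp, y, ⟨hy, hin⟩, rfl⟩

-- folding max over scores all ≤ m is a no-op
theorem pvFoldl_le (ps : List Int) (m : Int) (h : ∀ x ∈ ps, x ≤ m) :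
    ps.foldl max m = m := by
  induction ps with
  | nil => rfl
  | cons x t ih =>
    simp only [List.foldl_cons, max_eq_left (h x (by simp))]
    exact ih (fun y hy => h y (by simp [hy]))

-- descending patterns: first hit realizes the running max over all matched scores
theorem pvFirstMatch_eq (ps : List (String × Int)) (paths : List String)
    (hdesc : ps.Pairwise (fun a b => b.2 ≤ a.2))
    (hlo : ∀ x ∈ ps, 20 ≤ x.2) :
    pvFirstMatchH ps paths
      = ((ps.filter (fun p => paths.any (fun path => PySem.Str.isIn p.1 path))).map (·.2)).foldl
          max 20 := by
  induction ps with
  | nil => rfl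
  | cons x t ih =>
    rcases List.pairwise_cons.mp hdesc with ⟨hx, ht⟩
    simp only [pvFirstMatchH, List.filter_cons]
    by_cases h : (paths.any (fun path => PySem.Str.isIn x.1 path)) = true
    · simp only [h, if_pos, List.map_cons, List.foldl_cons]
      have h20 : max 20 x.2 = x.2 := max_eq_right (hlo x (by simp))
      rw [h20]
      refine (pvFoldl_le _ _ ?_).symm
      intro y hy
      simp only [List.mem_map, List.mem_filter] at hy
      rcases hy with ⟨z, ⟨hz, _⟩, rfl⟩
      exact hx z hz
    · simp only [h]
      exact ih ht (fun y hy => hlo y (by simp [hy]))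

-- ===== VERDICT (by name: the statement is the Claim_ definition above) =====
theorem score_intent_spec : Claim_equal_score_intent := by
  intro pages _
  unfold Spec_score_intent score_intent score_intent_alt
  by_cases hnil : pages = []
  · simp [hnil]
  · rw [if_neg hnil, if_neg hnil]
    have hmap : (pages.foldl (fun max_score page =>
          let path := PySem.Str.stripChars (PySem.Str.lower page) "/"
          pvScoresA.foldl (fun max_score ps =>
            if PySem.Str.isIn ps.1 path then max max_score ps.2 else max_score) max_score) 20)
        = ((pages.map (fun page => PySem.Str.stripChars (PySem.Str.lower page) "/")).foldl
            (fun m path =>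
              pvScoresA.foldl (fun m x => if PySem.Str.isIn x.1 path then max m x.2 else m) m) 20) := by
      rw [List.foldl_map]
    rw [hmap]
    set paths := pages.map (fun page => PySem.Str.stripChars (PySem.Str.lower page) "/") with hp
    rw [pvOuter_eq, pvTier_eq_first,
      pvFirstMatch_eq (pvFlat pvTiers) paths (by decide) (by decide)]
    have hsame : pvFlat pvTiers = pvScoresA := by decide
    rw [hsame]
    exact pvFoldlMax_subset 20 _ _
      (fun x hx => ((pvMem_flatMap_iff paths x).mp hx))
      (fun x hx => ((pvMem_flatMap_iff paths x).mpr hx))
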